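-- pv_equiv track=rewrite | github.com/zubie7a/Algorithms | CodeSignal/Challenges/Dropbox/04_Campus_Cup.py | campusCup
-- ===== SOURCE A (Python) =====
-- def campusCup(emails):
--     # For CampusCup, when somebody registers, the institution receives 20
--     # points. When it has 100 points, all the registered members get 3GB.
--     # When it reaches 200, an extra 8GB. Then at 300, everyone gets 15GB.
--     # Finally at 500, the members get a final extra 25GB. So in the end
--     # everyone gets at most 51GB. Create a scoreboard of schools and the
--     # amount of bonus space they have received (per student, not total).
--     universities = {}
--     for email in emails:
--         domain = email.split("@")[-1]
--         if domain in universities: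
--             universities[domain] += 1
--         else:
--             universities[domain] = 1
--
--     # Function to get the amount of bonus GB each student receives
--     # based on the amount of students registered for a same domain.
--     def get_space(registered):
--         space = 0
--         if (registered >= 5):
--             space += 3
--         if (registered >= 10):
--             space += 8
--         if (registered >= 15):
--             space += 15
--         if (registered >= 25):
--             space += 25
--         return space
--
--     scoreboard = []
--     for domain, registered in universities.items():
--         # Revert the map from universities to number of students registered
--         # to a list of tuples from score to the university domain, so we can
--         # sort the list primarily on space while keeping the domain.
--         scoreboard.append((get_space(registered), domain))
--
--     # The space is compared as negative to be able to sort the space from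
--     # highest to lowest, but maintain the alphabet ordering of domains.
--     # Python2 allowed a `cmp` function but Python3 only allows a `key`.
--     def key_score(score):
--         return (-score[0], score[1])
--
--     # Once it's sorted, don't return the space per student, only the domain.
--     return list(map(lambda x: x[1], sorted(scoreboard, key=key_score)))
-- ===== SOURCE B (Python) =====
-- def campusCup(emails):
--     # Same counting; then bucket domains by bonus score and emit buckets
--     # from highest score to lowest, each sorted alphabetically.
--     counts = {}
--     for email in emails:
--         d = email.split("@")[-1]
--         counts[d] = counts.get(d, 0) + 1
--
--     def space(registered):
--         return ((3 if registered >= 5 else 0)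
--                 + (8 if registered >= 10 else 0)
--                 + (15 if registered >= 15 else 0)
--                 + (25 if registered >= 25 else 0))
--
--     scoreboard = [(space(r), d) for d, r in counts.items()]
--     buckets = {}
--     for s, d in scoreboard:
--         buckets.setdefault(s, []).append(d)
--
--     result = []
--     for s in sorted(buckets, reverse=True):
--         result.extend(sorted(buckets[s]))
--     return result
-- ===== Notes on version B (the rewrite author's own statement) =====
-- stated objective: alternative
-- what changed: Replaces the single compound-key sort on (-space, domain) with a group-by-score pass: domains are bucketed by bonus score, and the result is the buckets in descending score order, each bucket sorted alphabetically.
import Mathlib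
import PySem

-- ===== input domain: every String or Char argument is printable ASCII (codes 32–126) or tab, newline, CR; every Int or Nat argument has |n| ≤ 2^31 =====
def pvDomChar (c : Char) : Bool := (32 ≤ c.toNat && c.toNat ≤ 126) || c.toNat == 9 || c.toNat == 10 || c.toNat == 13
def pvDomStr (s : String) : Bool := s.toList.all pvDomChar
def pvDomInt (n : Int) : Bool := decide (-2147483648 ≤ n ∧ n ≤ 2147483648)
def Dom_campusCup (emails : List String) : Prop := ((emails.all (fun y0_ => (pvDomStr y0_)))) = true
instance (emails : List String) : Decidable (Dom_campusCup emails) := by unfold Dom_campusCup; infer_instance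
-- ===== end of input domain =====

-- B replaces A's single compound-key sort on (-space, domain) by a group-by-score pass
-- (buckets by score, emitted from highest score to lowest, each sorted alphabetically);
-- same results, similar cost ("alternative").

-- shared helper: email.split("@")[-1]; split? is `some` of a nonempty list since "@" ≠ "",
-- so both getD defaults are unreachable (exact for every input)
def pyDomain (email : String) : String :=
  (((PySem.Str.split? email "@").getD []).getLast?).getD ""

-- ===== PORT A =====
def getSpace (registered : Int) : Int :=
  let space : Int := 0
  let space := if registered ≥ 5 then space + 3 else space
  let space := if registered ≥ 10 then space + 8 else space
  let space := if registered ≥ 15 then space + 15 else space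
  let space := if registered ≥ 25 then space + 25 else space
  space

def campusCup (emails : List String) : List String :=
  let universities : PySem.Dict String Int :=
    emails.foldl (fun u email =>
      let domain := pyDomain email
      if u.contains domain then
        -- universities[domain] += 1 : the key is present, get? is some
        u.insert domain ((u.get? domain).getD 0 + 1)
      else
        u.insert domain 1) PySem.Dict.empty
  let scoreboard : List (Int × String) :=
    universities.items.foldl (fun acc p => acc ++ [(getSpace p.2, p.1)]) []
  (PySem.List.sorted2 scoreboard (fun x => -x.1) (fun x => x.2)).map (fun x => x.2)

-- ===== PORT B =====
def spaceB (registered : Int) : Int :=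
  (if registered ≥ 5 then (3 : Int) else 0) + (if registered ≥ 10 then 8 else 0)
    + (if registered ≥ 15 then 15 else 0) + (if registered ≥ 25 then 25 else 0)

def campusCup_alt (emails : List String) : List String :=
  let counts : PySem.Dict String Int :=
    emails.foldl (fun c email =>
      let d := pyDomain email
      c.insert d (c.getD d 0 + 1)) PySem.Dict.empty
  let scoreboard : List (Int × String) := counts.items.map (fun p => (spaceB p.2, p.1))
  let buckets : PySem.Dict Int (List String) :=
    -- buckets.setdefault(s, []).append(d) : b[s] = b.get(s, []) + [d]
    scoreboard.foldl (fun b q => b.modify q.1 [] (fun l => l ++ [q.2])) PySem.Dict.empty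
  (PySem.List.sorted buckets.keys (fun x => x) true).foldl
    (fun acc s => acc ++ PySem.List.sorted (buckets.getD s []) (fun x => x)) []

-- ===== PRECONDITION & SPEC =====
def Spec_campusCup (emails : List String) (out : List String) : Prop := out = campusCup_alt emails
instance (emails : List String) (out : List String) : Decidable (Spec_campusCup emails out) := by unfold Spec_campusCup; infer_instance

-- ===== CLAIM (what is proved, stated in full; the proofs are below) =====
def Claim_equal_campusCup : Prop := ∀ (emails : List String), Dom_campusCup emails → Spec_campusCup emails (campusCup emails)

-- ===== LEMMAS AND PROOFS =====

theorem getSpace_eq_spaceB : getSpace = spaceB := by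
  funext r
  unfold getSpace spaceB
  split_ifs <;> ring

theorem sorted2_eq_sorted_toLex {α κ₁ κ₂ : Type} [LinearOrder κ₁] [LinearOrder κ₂]
    (xs : List α) (k1 : α → κ₁) (k2 : α → κ₂) :
    PySem.List.sorted2 xs k1 k2 = PySem.List.sorted xs (fun x => toLex (k1 x, k2 x)) := by
  unfold PySem.List.sorted2 PySem.List.sorted
  have h : (fun a b => decide (k1 a < k1 b) || (!decide (k1 b < k1 a) && decide (k2 a < k2 b)))
      = (fun a b : α => decide (toLex (k1 a, k2 a) < toLex (k1 b, k2 b))) := by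
    funext a b
    rcases lt_trichotomy (k1 a) (k1 b) with h1 | h1 | h1
    · simp [h1, asymm h1, Prod.Lex.lt_iff]
    · simp [h1, Prod.Lex.lt_iff]
    · simp [asymm h1, Prod.Lex.lt_iff, ne_of_gt h1, h1]
  rw [h]
theorem flatMap_filter_perm (K : List Int) (ps : List (Int × String)) (hK : K.Nodup)
    (hmem : ∀ p ∈ ps, p.1 ∈ K) :
    (K.flatMap (fun s => ps.filter (fun p => p.1 == s))).Perm ps := by
  induction K generalizing ps with
  | nil =>
    cases ps with
    | nil => simp
    | cons a t => exact absurd (hmem a (by simp)) (by simp)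
  | cons s t ih =>
    rw [List.flatMap_cons]
    have hst : ∀ s' ∈ t, s' ≠ s := by
      intro s' hs' he; exact (List.nodup_cons.mp hK).1 (he ▸ hs')
    have hcong : ∀ s' ∈ t, ps.filter (fun p => p.1 == s')
        = (ps.filter (fun p => !(p.1 == s))).filter (fun p => p.1 == s') := by
      intro s' hs'
      rw [List.filter_filter]
      apply List.filter_congr
      intro p _
      by_cases hp : p.1 = s'
      · simp [hp, hst s' hs']
      · simp [hp]
    rw [List.flatMap_congr hcong]
    have h2 := ih (ps.filter (fun p => !(p.1 == s))) (List.nodup_cons.mp hK).2 (by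
      intro p hp
      rcases List.mem_filter.mp hp with ⟨hps, hne⟩
      rcases List.mem_cons.mp (hmem p hps) with h | h
      · simp [h] at hne
      · exact h)
    exact (h2.append_left _).trans (List.filter_append_perm _ ps)

theorem sorted2_eq_buckets (ps : List (Int × String)) (hnd : (ps.map Prod.snd).Nodup) :
    PySem.List.sorted2 ps (fun x => -x.1) (fun x => x.2) =
      (PySem.List.sorted (PySem.Set.ofList (ps.map Prod.fst)) (fun x => x) true).flatMap
        (fun s => (PySem.List.sorted ((ps.filter (fun p => p.1 == s)).map Prod.snd)
          (fun x => x)).map (fun d => (s, d))) := by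
  rw [sorted2_eq_sorted_toLex]
  set K := PySem.List.sorted (PySem.Set.ofList (ps.map Prod.fst)) (fun x => x) true with hKdef
  have hKperm : K.Perm (PySem.Set.ofList (ps.map Prod.fst)) := PySem.List.sorted_perm _ _ _
  have hKnd : K.Nodup := hKperm.nodup_iff.mpr (PySem.Set.nodup_ofList _)
  have hKdesc : K.Pairwise (fun a b => b < a) := by
    have h1 := PySem.List.sorted_pairwise_rev (PySem.Set.ofList (ps.map Prod.fst)) (fun x => x)
    have := List.Pairwise.and h1 hKnd
    exact this.imp (fun h => lt_of_le_of_ne h.1 (Ne.symm h.2))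
  have hgrp : ∀ s, ((PySem.List.sorted ((ps.filter (fun p => p.1 == s)).map Prod.snd)
      (fun x => x)).map (fun d => (s, d))).Perm (ps.filter (fun p => p.1 == s)) := by
    intro s
    have h1 : (PySem.List.sorted ((ps.filter (fun p => p.1 == s)).map Prod.snd)
        (fun x => x)).Perm ((ps.filter (fun p => p.1 == s)).map Prod.snd) :=
      PySem.List.sorted_perm _ _ _
    have h2 := h1.map (fun d => (s, d))
    rw [List.map_map] at h2
    have h3 : (ps.filter (fun p => p.1 == s)).map ((fun d => (s, d)) ∘ Prod.snd)
        = ps.filter (fun p => p.1 == s) := by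
      have h5 : ∀ p ∈ ps.filter (fun p => p.1 == s),
          ((fun d => (s, d)) ∘ Prod.snd) p = id p := by
        intro p hp
        have h6 : p.1 = s := by simpa using (List.mem_filter.mp hp).2
        simp [Function.comp, ← h6]
      rw [List.map_congr_left h5, List.map_id]
    rw [h3] at h2
    exact h2
  apply PySem.List.sorted_eq_of_perm_of_pairwise_lt
  · -- Perm
    have h4 : (K.flatMap (fun s => (PySem.List.sorted ((ps.filter (fun p => p.1 == s)).map Prod.snd)
        (fun x => x)).map (fun d => (s, d)))).Perm
        (K.flatMap (fun s => ps.filter (fun p => p.1 == s))) :=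
      List.Perm.flatMap_left K (fun s _ => hgrp s)
    refine h4.trans (flatMap_filter_perm K ps hKnd ?_)
    intro p hp
    rw [hKperm.mem_iff, PySem.Set.mem_ofList]
    exact List.mem_map_of_mem hp
  · -- Pairwise
    rw [List.pairwise_flatMap]
    constructor
    · intro s hs
      rw [List.pairwise_map]
      have hgnd : ((ps.filter (fun p => p.1 == s)).map Prod.snd).Nodup :=
        hnd.sublist ((ps.filter_sublist).map Prod.snd)
      have hsnd : (PySem.List.sorted ((ps.filter (fun p => p.1 == s)).map Prod.snd)
          (fun x => x)).Nodup := (PySem.List.sorted_perm _ _ _).nodup_iff.mpr hgnd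
      have hple := PySem.List.sorted_pairwise ((ps.filter (fun p => p.1 == s)).map Prod.snd) (fun x => x)
      have := List.Pairwise.and hple hsnd
      refine this.imp (fun h => ?_)
      have hlt := lt_of_le_of_ne h.1 h.2
      rw [Prod.Lex.lt_iff]
      right
      exact ⟨rfl, hlt⟩
    · refine hKdesc.imp ?_
      intro s1 s2 hlt x hx y hy
      rcases List.mem_map.mp hx with ⟨d1, _, rfl⟩
      rcases List.mem_map.mp hy with ⟨d2, _, rfl⟩
      rw [Prod.Lex.lt_iff]
      left
      simpa using hlt


-- counting loops of A and B build the same dict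
theorem counts_eq (emails : List String) :
    emails.foldl (fun u email =>
      if u.contains (pyDomain email) then
        u.insert (pyDomain email) ((u.get? (pyDomain email)).getD 0 + 1)
      else u.insert (pyDomain email) 1) (PySem.Dict.empty : PySem.Dict String Int)
    = emails.foldl (fun c email =>
      c.insert (pyDomain email) (c.getD (pyDomain email) 0 + 1)) PySem.Dict.empty := by
  apply PySem.List.foldl_congr_mem
  intro u e _
  dsimp only
  cases hc : u.contains (pyDomain e) with
  | true => rw [if_pos rfl, PySem.Dict.getD_eq_get?_getD]
  | false => rw [if_neg (by simp), PySem.Dict.getD_of_not_contains u _ hc]; norm_num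

theorem campusCup_eq (emails : List String) : campusCup emails = campusCup_alt emails := by
  unfold campusCup campusCup_alt
  dsimp only
  rw [counts_eq]
  set C : PySem.Dict String Int := emails.foldl (fun c email =>
      c.insert (pyDomain email) (c.getD (pyDomain email) 0 + 1)) PySem.Dict.empty with hC
  rw [PySem.List.foldl_append_singleton_eq_map (fun p => (getSpace p.2, p.1)) C.items []]
  rw [List.nil_append, getSpace_eq_spaceB]
  set ps : List (Int × String) := C.items.map (fun p => (spaceB p.2, p.1)) with hps
  set B : PySem.Dict Int (List String) :=
    ps.foldl (fun b q => b.modify q.1 [] (fun l => l ++ [q.2])) PySem.Dict.empty with hB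
  have hkeysC : C.keys.Nodup := by
    rw [hC]
    exact PySem.Dict.nodup_keys_foldl_insert_key emails pyDomain
      (fun c email => c.getD (pyDomain email) 0 + 1) PySem.Dict.empty PySem.Dict.nodup_keys_empty
  have hnd : (ps.map Prod.snd).Nodup := by
    rw [hps, List.map_map]
    exact hkeysC
  have hgetD : ∀ s, B.getD s [] = (ps.filter (fun p => p.1 == s)).map Prod.snd := by
    intro s
    rw [hB, PySem.Dict.getD_foldl_modify_append ps PySem.Dict.empty s,
      PySem.Dict.getD_empty]
    rfl
  have hkeysB : B.keys = PySem.Set.ofList (ps.map Prod.fst) := by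
    rw [hB, PySem.Dict.keys_foldl_modify_key ps Prod.fst [] (fun b q => fun l => l ++ [q.2])
      PySem.Dict.empty, PySem.Dict.keys_empty, PySem.Set.ofList_eq_foldl]
    rfl
  rw [sorted2_eq_buckets ps hnd, hkeysB]
  rw [PySem.List.foldl_append_eq_flatMap, List.nil_append, List.map_flatMap]
  apply List.flatMap_congr
  intro s _
  rw [hgetD s, List.map_map]
  simp

-- ===== VERDICT (by name: the statement is the Claim_ definition above) =====
theorem campusCup_spec : Claim_equal_campusCup := by
  intro emails _
  unfold Spec_campusCup
  exact campusCup_eq emails
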